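-- pv_equiv track=rewrite | github.com/Marheen03/temporalNetworks | utils.py | get_community_of_node
-- ===== SOURCE A (Python) =====
-- def get_community_of_node(communities, allFlies):
--     """
--     Returns community ID in which given node is part of.
--
--     Parameters:
--     communities (list): List of communities represented as sets.
--     allFlies (list): List of fly names.
--
--     Returns:
--     dict: Flies as keys and community ID as values (0 if node isn't part of community).
--     """
--     communityOfNode = {}
--     for fly in allFlies:
--         communityOfNode[fly] = 0
--
--         for i, community in enumerate(communities):
--             # check if fly is within certain community
--             if fly in community:
--                 communityOfNode[fly] = i+1
--                 break
--
--     return communityOfNode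
-- ===== SOURCE B (Python) =====
-- def get_community_of_node(communities, allFlies):
--     """
--     Returns community ID in which given node is part of.
--
--     Inverted index version: one pass over the communities builds a
--     member -> first community ID map, then each fly is a single lookup.
--     """
--     idx = {}
--     for i, community in enumerate(communities):
--         for member in community:
--             if member not in idx:
--                 idx[member] = i + 1
--     return {fly: idx.get(fly, 0) for fly in allFlies}
-- ===== Notes on version B (the rewrite author's own statement) =====
-- stated objective: faster
-- what changed: Replaces the per-fly linear scan over all communities with an inverted index (member -> first community ID) built in one pass over the communities, making each fly a single dict lookup.
import Mathlib
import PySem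

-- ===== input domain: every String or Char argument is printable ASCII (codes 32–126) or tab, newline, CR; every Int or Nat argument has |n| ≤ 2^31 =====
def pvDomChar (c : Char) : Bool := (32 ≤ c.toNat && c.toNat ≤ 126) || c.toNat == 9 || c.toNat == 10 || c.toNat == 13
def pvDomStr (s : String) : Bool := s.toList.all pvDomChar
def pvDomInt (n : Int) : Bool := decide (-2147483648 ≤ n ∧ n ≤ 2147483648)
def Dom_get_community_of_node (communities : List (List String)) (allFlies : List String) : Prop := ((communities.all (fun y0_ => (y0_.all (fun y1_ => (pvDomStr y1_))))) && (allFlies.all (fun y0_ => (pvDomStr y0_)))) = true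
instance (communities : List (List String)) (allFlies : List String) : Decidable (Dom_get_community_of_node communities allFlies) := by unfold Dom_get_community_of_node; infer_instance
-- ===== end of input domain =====

-- B replaces A's per-fly scan over all communities with an inverted index built
-- in one pass over the communities (objective: faster; A is O(F*M), B is O(F+M)).

-- ===== PORT A =====
-- A's inner 'for i, community in enumerate(communities): if fly in community: d[fly]=i+1; break'
def pvLoopA (fly : String) : List (Int × List String) → PySem.Dict String Int → PySem.Dict String Int
  | [], d => d
  | (i, community) :: rest, d =>
      if community.contains fly then d.insert fly (i + 1) else pvLoopA fly rest d

def get_community_of_node (communities : List (List String)) (allFlies : List String) : List (String × Int) :=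
  (allFlies.foldl
    (fun d fly => pvLoopA fly (PySem.List.enumerate communities) (d.insert fly 0))
    PySem.Dict.empty).items

-- ===== PORT B =====
-- Source B's inverted index: for i, community: for member: if member not in idx: idx[member] = i+1
def pvBuildIdx (communities : List (List String)) : PySem.Dict String Int :=
  (PySem.List.enumerate communities).foldl
    (fun d p => p.2.foldl (fun d2 m => if d2.contains m then d2 else d2.insert m (p.1 + 1)) d)
    PySem.Dict.empty

def get_community_of_node_alt (communities : List (List String)) (allFlies : List String) : List (String × Int) :=
  let idx := pvBuildIdx communities
  (allFlies.foldl (fun r fly => r.insert fly (idx.getD fly 0)) PySem.Dict.empty).items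

-- ===== PRECONDITION & SPEC =====
def Spec_get_community_of_node (communities : List (List String)) (allFlies : List String) (out : List (String × Int)) : Prop := out = get_community_of_node_alt communities allFlies
instance (communities : List (List String)) (allFlies : List String) (out : List (String × Int)) : Decidable (Spec_get_community_of_node communities allFlies out) := by unfold Spec_get_community_of_node; infer_instance

-- ===== CLAIM (what is proved, stated in full; the proofs are below) =====
def Claim_equal_get_community_of_node : Prop := ∀ (communities : List (List String)) (allFlies : List String), Dom_get_community_of_node communities allFlies → Spec_get_community_of_node communities allFlies (get_community_of_node communities allFlies)

-- ===== LEMMAS AND PROOFS =====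

-- first community ID (index+1) containing the fly, over an enumerated community list
def pvFirstVal (fly : String) : List (Int × List String) → Option Int
  | [] => none
  | (i, c) :: rest => if c.contains fly then some (i + 1) else pvFirstVal fly rest

theorem pv_insert_insert_self (d : PySem.Dict String Int) (k : String) (a b : Int) :
    (d.insert k a).insert k b = d.insert k b := by
  apply PySem.Dict.ext_iff.mpr
  by_cases h : d.contains k = true
  · have h2 : (d.insert k a).contains k = true := by simp
    rw [PySem.Dict.items_insert_of_contains _ b h2,
        PySem.Dict.items_insert_of_contains _ a h,
        PySem.Dict.items_insert_of_contains _ b h, List.map_map]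
    apply List.map_congr_left
    intro p _
    by_cases hp : p.1 = k <;> simp [hp]
  · have h' : d.contains k = false := by simpa using h
    have h2 : (d.insert k a).contains k = true := by simp
    have hnk : ∀ p ∈ d.items, (p.1 == k) = false := by
      intro p hp
      by_cases hpk : p.1 = k
      · exact absurd ((PySem.Dict.contains_iff_mem_keys d k).mpr
          (hpk ▸ PySem.Dict.mem_keys_of_mem_items d hp)) h
      · simpa using hpk
    rw [PySem.Dict.items_insert_of_contains _ b h2,
        PySem.Dict.items_insert_of_not_contains _ a h',
        PySem.Dict.items_insert_of_not_contains _ b h',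
        List.map_append]
    have hmap : d.items.map (fun p => if p.1 = k then (k, b) else p) = d.items := by
      conv_rhs => rw [← List.map_id d.items]
      apply List.map_congr_left
      intro p hp
      have hne := hnk p hp
      simp only [beq_eq_false_iff_ne, ne_eq] at hne
      simp [hne]
    simp [hmap]

theorem pv_loopA_insert (fly : String) (l : List (Int × List String))
    (d : PySem.Dict String Int) (v0 : Int) :
    pvLoopA fly l (d.insert fly v0) = d.insert fly ((pvFirstVal fly l).getD v0) := by
  induction l generalizing v0 with
  | nil => rfl
  | cons p rest ih =>
    obtain ⟨i, c⟩ := p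
    by_cases h : fly ∈ c
    · simp [pvLoopA, pvFirstVal, h, pv_insert_insert_self]
    · simp [pvLoopA, pvFirstVal, h, ih]

theorem pv_inner_get? (i : Int) (c : List String) (d : PySem.Dict String Int) (m : String) :
    (c.foldl (fun d2 x => if d2.contains x then d2 else d2.insert x (i + 1)) d).get? m
      = ((d.get? m).orElse (fun _ => if c.contains m then some (i + 1) else none)) := by
  induction c generalizing d with
  | nil => cases hg : d.get? m <;> simp [hg]
  | cons x xs ih =>
    simp only [List.foldl_cons, ih]
    by_cases hmx : m = x
    · subst hmx
      by_cases hc : d.contains m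
      · rw [PySem.Dict.contains_eq_isSome_get?] at hc
        obtain ⟨v, hg⟩ := Option.isSome_iff_exists.mp hc
        have hcm : d.contains m = true := by
          rw [PySem.Dict.contains_eq_isSome_get?, hg]; rfl
        simp [hcm, hg]
      · have hg : d.get? m = none := by
          rw [PySem.Dict.contains_eq_isSome_get?] at hc
          simpa using hc
        simp [hc, hg, PySem.Dict.get?_insert_self]
    · by_cases hc : d.contains x
      · simp only [hc, if_true]
        cases d.get? m <;> simp [hmx]

      · simp only [hc, if_false, Bool.false_eq_true,
          PySem.Dict.get?_insert_of_ne _ _ hmx]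
        cases d.get? m <;> simp [hmx]

theorem pv_build_get? (l : List (Int × List String)) (d : PySem.Dict String Int) (m : String) :
    (l.foldl (fun d p => p.2.foldl (fun d2 x => if d2.contains x then d2 else d2.insert x (p.1 + 1)) d) d).get? m
      = ((d.get? m).orElse (fun _ => pvFirstVal m l)) := by
  induction l generalizing d with
  | nil => cases hg : d.get? m <;> simp [hg, pvFirstVal]
  | cons p rest ih =>
    obtain ⟨i, c⟩ := p
    simp only [List.foldl_cons, ih, pv_inner_get?]
    cases d.get? m <;> by_cases h : m ∈ c <;> simp [pvFirstVal, h]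

theorem pv_idx_getD (communities : List (List String)) (fly : String) :
    (pvBuildIdx communities).getD fly 0 = (pvFirstVal fly (PySem.List.enumerate communities)).getD 0 := by
  rw [PySem.Dict.getD_eq_get?_getD, pvBuildIdx, pv_build_get?]
  simp

theorem get_community_of_node_spec : Claim_equal_get_community_of_node := by
  intro communities allFlies _
  unfold Spec_get_community_of_node get_community_of_node get_community_of_node_alt
  congr 1
  have hstep : (fun (d : PySem.Dict String Int) fly =>
        pvLoopA fly (PySem.List.enumerate communities) (d.insert fly 0))
      = (fun (r : PySem.Dict String Int) fly =>
        r.insert fly ((pvBuildIdx communities).getD fly 0)) := by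
    funext d fly
    rw [pv_loopA_insert, pv_idx_getD]
  rw [hstep]
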